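-- pv_equiv track=rewrite | github.com/dsc-chiba-u/hackathon-20250324 | setup_env_unified.py | identify_models
-- ===== SOURCE A (Python) =====
-- def identify_models(deployments):
--     """デプロイメントからチャットモデルとエンベディングモデルを識別する"""
--     chat_model = None
--     chat_deployment = None
--     embedding_model = None
--     embedding_deployment = None
--
--     for deployment in deployments:
--         model_name = deployment.get('model')
--         deployment_name = deployment.get('name')
--
--         if not model_name or not deployment_name:
--             continue
--
--         # GPTモデルはチャット用
--         if 'gpt' in model_name.lower() or 'chat' in model_name.lower():
--             # 最新のGPTモデルを優先（簡易的な実装）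
--             if not chat_model or 'gpt-4' in model_name.lower():
--                 chat_model = model_name
--                 chat_deployment = deployment_name
--
--         # エンベディングモデル識別
--         if 'embedding' in model_name.lower() or 'ada' in model_name.lower():
--             embedding_model = model_name
--             embedding_deployment = deployment_name
--
--     return chat_model, chat_deployment, embedding_model, embedding_deployment
-- ===== SOURCE B (Python) =====
-- def identify_models(deployments):
--     """デプロイメントからチャットモデルとエンベディングモデルを識別する"""
--     # valid (model, name) candidates: both fields present and non-empty
--     cands = [(d.get('model'), d.get('name')) for d in deployments]
--     cands = [(m, n) for (m, n) in cands if m and n]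
--     chat = [(m, n) for (m, n) in cands
--             if 'gpt' in m.lower() or 'chat' in m.lower()]
--     emb = [(m, n) for (m, n) in cands
--            if 'embedding' in m.lower() or 'ada' in m.lower()]
--     gpt4 = [(m, n) for (m, n) in chat if 'gpt-4' in m.lower()]
--     if gpt4:
--         chat_pick = gpt4[-1]
--     elif chat:
--         chat_pick = chat[0]
--     else:
--         chat_pick = (None, None)
--     emb_pick = emb[-1] if emb else (None, None)
--     return chat_pick[0], chat_pick[1], emb_pick[0], emb_pick[1]
-- ===== Notes on version B (the rewrite author's own statement) =====
-- stated objective: alternative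
-- what changed: Replaces the single stateful scan with mutable chat/embedding slots by declarative filtering: build the valid candidate list once, filter chat/embedding/gpt-4 candidate lists, and pick last-gpt-4-else-first-chat and last-embedding by list selection.
import Mathlib
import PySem

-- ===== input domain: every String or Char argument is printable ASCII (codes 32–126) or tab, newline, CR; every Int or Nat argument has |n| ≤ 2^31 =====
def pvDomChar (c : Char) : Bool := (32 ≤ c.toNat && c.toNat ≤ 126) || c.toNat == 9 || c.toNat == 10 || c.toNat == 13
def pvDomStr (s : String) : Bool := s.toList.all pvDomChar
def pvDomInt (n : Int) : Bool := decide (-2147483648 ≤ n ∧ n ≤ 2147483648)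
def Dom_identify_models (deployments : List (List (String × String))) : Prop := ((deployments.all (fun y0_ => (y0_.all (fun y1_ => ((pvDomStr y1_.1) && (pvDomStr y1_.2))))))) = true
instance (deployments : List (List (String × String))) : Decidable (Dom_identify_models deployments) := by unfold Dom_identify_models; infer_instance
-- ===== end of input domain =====

-- B replaces A's stateful scan (mutable chat/embedding slots) with candidate-list filtering and
-- explicit last/first selection; alternative decomposition, same cost.

-- ===== PORT A =====
-- Python truthiness of an optional string: falsy iff missing or empty.
def pyFalsyStr (o : Option String) : Bool :=
  match o with
  | none => true
  | some s => s = ""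

-- one iteration of A's loop; state = ((chat_model, chat_deployment), (embedding_model, embedding_deployment))
def imStepA (st : (Option String × Option String) × (Option String × Option String))
    (deployment : List (String × String)) :
    (Option String × Option String) × (Option String × Option String) :=
  let model_name := (PySem.Dict.mk deployment).get? "model"
  let deployment_name := (PySem.Dict.mk deployment).get? "name"
  if pyFalsyStr model_name || pyFalsyStr deployment_name then st
  else
    match model_name, deployment_name with
    | some m, some n =>
      let chat :=
        if PySem.Str.isIn "gpt" (PySem.Str.lower m) || PySem.Str.isIn "chat" (PySem.Str.lower m) then
          (if pyFalsyStr st.1.1 || PySem.Str.isIn "gpt-4" (PySem.Str.lower m) then (some m, some n) else st.1)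
        else st.1
      let emb :=
        if PySem.Str.isIn "embedding" (PySem.Str.lower m) || PySem.Str.isIn "ada" (PySem.Str.lower m) then
          (some m, some n)
        else st.2
      (chat, emb)
    | _, _ => st

def identify_models (deployments : List (List (String × String))) :
    Option String × Option String × Option String × Option String :=
  let r := deployments.foldl imStepA ((none, none), (none, none))
  (r.1.1, r.1.2, r.2.1, r.2.2)

-- ===== PORT B =====
-- valid (model, name) candidates: both fields present and non-empty
def imCands (deployments : List (List (String × String))) : List (String × String) :=
  deployments.filterMap (fun d =>
    match (PySem.Dict.mk d).get? "model", (PySem.Dict.mk d).get? "name" with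
    | some m, some n => if m = "" || n = "" then none else some (m, n)
    | _, _ => none)

def imIsChat (m : String) : Bool :=
  PySem.Str.isIn "gpt" (PySem.Str.lower m) || PySem.Str.isIn "chat" (PySem.Str.lower m)

def imIsEmb (m : String) : Bool :=
  PySem.Str.isIn "embedding" (PySem.Str.lower m) || PySem.Str.isIn "ada" (PySem.Str.lower m)

def imIsGpt4 (m : String) : Bool := PySem.Str.isIn "gpt-4" (PySem.Str.lower m)

def identify_models_alt (deployments : List (List (String × String))) :
    Option String × Option String × Option String × Option String :=
  let cands := imCands deployments
  let chat := cands.filter (fun p => imIsChat p.1)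
  let emb := cands.filter (fun p => imIsEmb p.1)
  let gpt4 := chat.filter (fun p => imIsGpt4 p.1)
  let chatPick : Option String × Option String :=
    match gpt4.getLast? with
    | some p => (some p.1, some p.2)
    | none =>
      match chat.head? with
      | some p => (some p.1, some p.2)
      | none => (none, none)
  let embPick : Option String × Option String :=
    match emb.getLast? with
    | some p => (some p.1, some p.2)
    | none => (none, none)
  (chatPick.1, chatPick.2, embPick.1, embPick.2)

-- ===== PRECONDITION & SPEC =====
def Spec_identify_models (deployments : List (List (String × String))) (out : Option String × Option String × Option String × Option String) : Prop := out = identify_models_alt deployments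
instance (deployments : List (List (String × String))) (out : Option String × Option String × Option String × Option String) : Decidable (Spec_identify_models deployments out) := by unfold Spec_identify_models; infer_instance

-- ===== CLAIM (what is proved, stated in full; the proofs are below) =====
def Claim_equal_identify_models : Prop := ∀ (deployments : List (List (String × String))), Dom_identify_models deployments → Spec_identify_models deployments (identify_models deployments)

-- ===== LEMMAS AND PROOFS =====

-- A's loop step restricted to the chat slot, acting on a valid candidate
def imChatStep (c : Option String × Option String) (p : String × String) :
    Option String × Option String :=
  if imIsChat p.1 then
    (if pyFalsyStr c.1 || imIsGpt4 p.1 then (some p.1, some p.2) else c)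
  else c

-- A's loop step restricted to the embedding slot
def imEmbStep (e : Option String × Option String) (p : String × String) :
    Option String × Option String :=
  if imIsEmb p.1 then (some p.1, some p.2) else e

theorem imFold_decompose (ds : List (List (String × String)))
    (st : (Option String × Option String) × (Option String × Option String)) :
    ds.foldl imStepA st =
      ((imCands ds).foldl imChatStep st.1, (imCands ds).foldl imEmbStep st.2) := by
  induction ds generalizing st with
  | nil => simp [imCands]
  | cons d ds ih =>
    rw [List.foldl_cons]
    rcases hm : (PySem.Dict.mk d).get? "model" with _ | m
    · have h1 : imStepA st d = st := by simp [imStepA, hm, pyFalsyStr]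
      have h2 : imCands (d :: ds) = imCands ds := by simp [imCands, List.filterMap_cons, hm]
      rw [h1, h2, ih]
    · rcases hn : (PySem.Dict.mk d).get? "name" with _ | n
      · have h1 : imStepA st d = st := by simp [imStepA, hm, hn, pyFalsyStr]
        have h2 : imCands (d :: ds) = imCands ds := by simp [imCands, List.filterMap_cons, hm, hn]
        rw [h1, h2, ih]
      · by_cases h1 : m = ""
        · have ha : imStepA st d = st := by simp [imStepA, hm, hn, pyFalsyStr, h1]
          have hb : imCands (d :: ds) = imCands ds := by simp [imCands, List.filterMap_cons, hm, hn, h1]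
          rw [ha, hb, ih]
        · by_cases h2 : n = ""
          · have ha : imStepA st d = st := by simp [imStepA, hm, hn, pyFalsyStr, h2]
            have hb : imCands (d :: ds) = imCands ds := by simp [imCands, List.filterMap_cons, hm, hn, h2]
            rw [ha, hb, ih]
          · have ha : imStepA st d = (imChatStep st.1 (m, n), imEmbStep st.2 (m, n)) := by
              simp [imStepA, hm, hn, pyFalsyStr, h1, h2, imChatStep, imEmbStep, imIsChat, imIsEmb, imIsGpt4]
            have hb : imCands (d :: ds) = (m, n) :: imCands ds := by
              simp [imCands, List.filterMap_cons, hm, hn, h1, h2]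
            rw [ha, hb, ih, List.foldl_cons, List.foldl_cons]

theorem imCands_fst_ne (ds : List (List (String × String))) :
    ∀ p ∈ imCands ds, p.1 ≠ "" := by
  intro p hp
  simp only [imCands, List.mem_filterMap] at hp
  obtain ⟨d, _, hd⟩ := hp
  rcases hm : (PySem.Dict.mk d).get? "model" with _ | m <;> rw [hm] at hd
  · simp at hd
  · rcases hn : (PySem.Dict.mk d).get? "name" with _ | n <;> rw [hn] at hd
    · simp at hd
    · by_cases h1 : m = ""
      · simp [h1] at hd
      · by_cases h2 : n = ""
        · simp [h2] at hd
        · simp only [h1, h2] at hd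
          rw [if_neg (by simp)] at hd
          injection hd with hd
          rw [← hd]
          exact h1

theorem imGetLast?_cons_of_some {α : Type} (x : α) (l : List α) (q : α)
    (h : l.getLast? = some q) : (x :: l).getLast? = some q := by
  cases l with
  | nil => simp at h
  | cons a t => rw [List.getLast?_cons_cons]; exact h

theorem imEmbFold (xs : List (String × String)) (e : Option String × Option String) :
    xs.foldl imEmbStep e =
      match (xs.filter (fun p => imIsEmb p.1)).getLast? with
      | some p => (some p.1, some p.2)
      | none => e := by
  induction xs using List.reverseRecOn with
  | nil => simp
  | append_singleton xs x ih =>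
    rw [List.foldl_append, List.filter_append]
    by_cases h : imIsEmb x.1 <;>
      simp [imEmbStep, h, List.getLast?_concat, ih]

theorem imChatFold_set (xs : List (String × String)) (m n : String) (hm : m ≠ "")
    (hxs : ∀ p ∈ xs, p.1 ≠ "") :
    xs.foldl imChatStep (some m, some n) =
      match ((xs.filter (fun p => imIsChat p.1)).filter (fun p => imIsGpt4 p.1)).getLast? with
      | some p => (some p.1, some p.2)
      | none => (some m, some n) := by
  induction xs generalizing m n with
  | nil => simp
  | cons x xs ih =>
    have hx : x.1 ≠ "" := hxs x (by simp)
    have hxs' : ∀ p ∈ xs, p.1 ≠ "" := fun p hp => hxs p (by simp [hp])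
    by_cases hc : imIsChat x.1
    · by_cases hg : imIsGpt4 x.1
      · rw [List.foldl_cons]
        have : imChatStep (some m, some n) x = (some x.1, some x.2) := by
          simp [imChatStep, hc, hg]
        rw [this, ih x.1 x.2 hx hxs']
        simp only [List.filter_cons, hc, hg, if_true]
        cases h : ((xs.filter (fun p => imIsChat p.1)).filter (fun p => imIsGpt4 p.1)).getLast? with
        | none =>
          have hnil := List.getLast?_eq_none_iff.mp h
          simp [hnil]
        | some q => rw [imGetLast?_cons_of_some x _ q h]
      · rw [List.foldl_cons]
        have : imChatStep (some m, some n) x = (some m, some n) := by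
          simp [imChatStep, hc, hg, pyFalsyStr, hm]
        rw [this, ih m n hm hxs']
        simp [List.filter_cons, hc, hg]
    · rw [List.foldl_cons]
      have : imChatStep (some m, some n) x = (some m, some n) := by
        simp [imChatStep, hc]
      rw [this, ih m n hm hxs']
      simp [List.filter_cons, hc]

theorem imChatFold (xs : List (String × String)) (hxs : ∀ p ∈ xs, p.1 ≠ "") :
    xs.foldl imChatStep (none, none) =
      match ((xs.filter (fun p => imIsChat p.1)).filter (fun p => imIsGpt4 p.1)).getLast? with
      | some p => (some p.1, some p.2)
      | none =>
        match (xs.filter (fun p => imIsChat p.1)).head? with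
        | some p => (some p.1, some p.2)
        | none => (none, none) := by
  induction xs with
  | nil => simp
  | cons x xs ih =>
    have hx : x.1 ≠ "" := hxs x (by simp)
    have hxs' : ∀ p ∈ xs, p.1 ≠ "" := fun p hp => hxs p (by simp [hp])
    by_cases hc : imIsChat x.1
    · rw [List.foldl_cons]
      have : imChatStep (none, none) x = (some x.1, some x.2) := by
        simp [imChatStep, hc, pyFalsyStr]
      rw [this, imChatFold_set xs x.1 x.2 hx hxs']
      simp only [List.filter_cons, hc, if_true, List.head?_cons]
      by_cases hg : imIsGpt4 x.1
      · simp only [hg, if_true]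
        cases h : ((xs.filter (fun p => imIsChat p.1)).filter (fun p => imIsGpt4 p.1)).getLast? with
        | none =>
          have hnil := List.getLast?_eq_none_iff.mp h
          simp [hnil]
        | some q => rw [imGetLast?_cons_of_some x _ q h]
      · rw [if_neg hg]
    · rw [List.foldl_cons]
      have : imChatStep (none, none) x = (none, none) := by
        simp [imChatStep, hc]
      rw [this, ih hxs']
      simp [List.filter_cons, hc]

-- ===== VERDICT (by name: the statement is the Claim_ definition above) =====
theorem identify_models_spec : Claim_equal_identify_models := by
  intro ds _
  unfold Spec_identify_models identify_models identify_models_alt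
  rw [imFold_decompose ds ((none, none), (none, none))]
  rw [imChatFold (imCands ds) (imCands_fst_ne ds), imEmbFold]
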